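-- pv_equiv track=rewrite | github.com/lemmyhemmingway/adventofcode | 2015/python/day1.py | part2
-- ===== SOURCE A (Python) =====
-- def part2(data):
--     position = 0
--     index = 0
--     for c in data:
--         if c == "(":
--             position += 1
--         elif c == ")":
--             position -= 1
--         index += 1
--
--         if position == -1:
--             break
--
--     return index
-- ===== SOURCE B (Python) =====
-- def _solve(s, b):
--     # Divide and conquer: returns (hit, b2) where hit is the first 1-based
--     # offset in s at which the running balance, started at b, reaches -1
--     # (None if it never does), and b2 is the balance after the consumed part
--     # (the whole of s when hit is None).
--     if len(s) == 0:
--         return None, b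
--     if len(s) == 1:
--         b2 = b + (1 if s == "(" else -1 if s == ")" else 0)
--         return (1 if b2 == -1 else None), b2
--     mid = len(s) // 2
--     hit, b2 = _solve(s[:mid], b)
--     if hit is not None:
--         return hit, b2
--     hit, b3 = _solve(s[mid:], b2)
--     return (mid + hit if hit is not None else None), b3
--
-- def part2(data):
--     hit, _ = _solve(data, 0)
--     return hit if hit is not None else len(data)
-- ===== Notes on version B (the rewrite author's own statement) =====
-- stated objective: alternative
-- what changed: Replaces A's single left-to-right scan with a divide-and-conquer recursion: split the string in half, solve each half returning (first-hit offset, balance delta), and combine, locating the first index where the balance reaches -1 without any linear loop.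
import Mathlib
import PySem

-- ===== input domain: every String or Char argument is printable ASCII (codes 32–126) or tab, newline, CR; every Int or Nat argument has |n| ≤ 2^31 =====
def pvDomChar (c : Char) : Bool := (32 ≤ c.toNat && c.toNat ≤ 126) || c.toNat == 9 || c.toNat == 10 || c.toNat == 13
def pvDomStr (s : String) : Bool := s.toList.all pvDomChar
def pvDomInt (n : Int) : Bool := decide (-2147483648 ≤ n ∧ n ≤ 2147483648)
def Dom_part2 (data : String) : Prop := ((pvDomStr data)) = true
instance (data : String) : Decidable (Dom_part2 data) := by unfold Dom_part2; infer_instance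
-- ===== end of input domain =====

-- B replaces A's single left-to-right scan with a divide-and-conquer recursion
-- (split in half, combine (first-hit, delta) of the halves); return values are equal.

-- ===== PORT A =====
-- the for-loop of A: state (position, index), early break when position hits -1
def part2Loop : List Char → Int → Int → Int
  | [], _, index => index
  | c :: cs, position, index =>
      let position := if c = '(' then position + 1
                      else if c = ')' then position - 1 else position
      let index := index + 1
      if position = -1 then index else part2Loop cs position index

def part2 (data : String) : Int := part2Loop data.toList 0 0

-- ===== PORT B =====
-- _solve: divide and conquer; (hit, b2) with hit the first 1-based offset where the
-- running balance from b reaches -1, b2 the balance after the consumed part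
def solveB : List Char → Int → Option Int × Int
  | [], b => (none, b)
  | [c], b =>
      let b2 := b + (if c = '(' then 1 else if c = ')' then -1 else 0)
      ((if b2 = -1 then some 1 else none), b2)
  | c1 :: c2 :: t, b =>
      let mid := (c1 :: c2 :: t).length / 2
      let p := solveB ((c1 :: c2 :: t).take mid) b
      match p.1 with
      | some h => (some h, p.2)
      | none =>
        let q := solveB ((c1 :: c2 :: t).drop mid) p.2
        ((q.1.map (fun h => (mid : Int) + h)), q.2)
termination_by s _ => s.length
decreasing_by
  · simp [List.length_take]; omega
  · simp [List.length_drop]; omega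

def part2_alt (data : String) : Int :=
  match (solveB data.toList 0).1 with
  | some h => h
  | none => (data.toList.length : Int)

-- ===== PRECONDITION & SPEC =====
def Spec_part2 (data : String) (out : Int) : Prop := out = part2_alt data
instance (data : String) (out : Int) : Decidable (Spec_part2 data out) := by unfold Spec_part2; infer_instance

-- ===== CLAIM (what is proved, stated in full; the proofs are below) =====
def Claim_equal_part2 : Prop := ∀ (data : String), Dom_part2 data → Spec_part2 data (part2 data)

-- ===== LEMMAS AND PROOFS =====

-- common characterisation: first 1-based offset where the running balance from b hits -1
def balHit : List Char → Int → Option Int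
  | [], _ => none
  | c :: cs, b =>
      let b' := b + (if c = '(' then 1 else if c = ')' then -1 else 0)
      if b' = -1 then some 1 else (balHit cs b').map (· + 1)

def deltaC (s : List Char) : Int :=
  (s.map (fun c => if c = '(' then 1 else if c = ')' then -1 else 0)).sum

theorem deltaC_append (l r : List Char) : deltaC (l ++ r) = deltaC l + deltaC r := by
  simp [deltaC]

theorem balHit_append (l r : List Char) : ∀ b : Int,
    balHit (l ++ r) b
      = match balHit l b with
        | some h => some h
        | none => (balHit r (b + deltaC l)).map (· + (l.length : Int)) := by
  induction l with
  | nil =>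
      intro b
      simp only [List.nil_append, balHit, deltaC, List.map_nil, List.sum_nil, add_zero,
        List.length_nil]
      cases balHit r b <;> simp
  | cons c l ih =>
      intro b
      simp only [List.cons_append, balHit]
      by_cases h1 : b + (if c = '(' then 1 else if c = ')' then -1 else 0) = -1
      · simp [h1]
      · simp only [if_neg h1, ih]
        have hd : b + deltaC (c :: l)
            = (b + (if c = '(' then 1 else if c = ')' then -1 else 0)) + deltaC l := by
          simp [deltaC]; ring
        rw [hd]
        cases balHit l (b + (if c = '(' then 1 else if c = ')' then -1 else 0)) with
        | some h => simp
        | none =>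
            cases balHit r ((b + (if c = '(' then 1 else if c = ')' then -1 else 0)) + deltaC l) with
            | none => simp
            | some h => simp; ring

theorem solveB_spec : ∀ (n : Nat) (s : List Char), s.length ≤ n → ∀ b : Int,
    (solveB s b).1 = balHit s b ∧ ((solveB s b).1 = none → (solveB s b).2 = b + deltaC s) := by
  intro n
  induction n with
  | zero =>
      intro s hs b
      have : s = [] := List.eq_nil_of_length_eq_zero (Nat.le_zero.mp hs)
      subst this
      simp [solveB, balHit, deltaC]
  | succ n ih =>
      intro s hs b
      match s with
      | [] => simp [solveB, balHit, deltaC]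
      | [c] =>
          constructor
          · by_cases h : b + (if c = '(' then 1 else if c = ')' then -1 else 0) = -1 <;>
              simp [solveB, balHit, h]
          · intro _
            simp [solveB, deltaC]
      | c1 :: c2 :: t =>
          set s' : List Char := c1 :: c2 :: t with hs'
          have hlen : 2 ≤ s'.length := by simp [hs']
          have hmid1 : 1 ≤ s'.length / 2 := by omega
          have hmid2 : s'.length / 2 < s'.length := by omega
          have hsn : s'.length ≤ n + 1 := hs
          have htake : (s'.take (s'.length / 2)).length ≤ n := by
            simp [List.length_take]; omega
          have hdrop : (s'.drop (s'.length / 2)).length ≤ n := by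
            simp [List.length_drop]; omega
          have ihl := ih (s'.take (s'.length / 2)) htake b
          have hsplit : s'.take (s'.length / 2) ++ s'.drop (s'.length / 2) = s' :=
            List.take_append_drop _ _
          have hltake : (s'.take (s'.length / 2)).length = s'.length / 2 := by
            simp [List.length_take]; omega
          have happ := balHit_append (s'.take (s'.length / 2)) (s'.drop (s'.length / 2)) b
          rw [hsplit] at happ
          rw [show solveB s' b =
              (let mid := s'.length / 2
               let p := solveB (s'.take mid) b
               match p.1 with
               | some h => (some h, p.2)
               | none =>
                 let q := solveB (s'.drop mid) p.2
                 ((q.1.map (fun h => (mid : Int) + h)), q.2)) from by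
            conv_lhs => rw [hs', solveB]]
          simp only []
          cases hfst : (solveB (s'.take (s'.length / 2)) b).1 with
          | some h =>
              have hb : balHit (s'.take (s'.length / 2)) b = some h := by
                rw [← ihl.1, hfst]
              constructor
              · simp [happ, hb]
              · intro hcontra; simp at hcontra
          | none =>
              have hb : balHit (s'.take (s'.length / 2)) b = none := by
                rw [← ihl.1, hfst]
              have hb2 : (solveB (s'.take (s'.length / 2)) b).2
                  = b + deltaC (s'.take (s'.length / 2)) := ihl.2 hfst
              have ihr := ih (s'.drop (s'.length / 2)) hdrop
                (b + deltaC (s'.take (s'.length / 2)))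
              rw [hb2]
              constructor
              · rw [happ, hb]
                simp only [ihr.1, hltake]
                cases balHit (s'.drop (s'.length / 2)) (b + deltaC (s'.take (s'.length / 2))) with
                | none => simp
                | some h => simp; ring
              · intro hnone
                simp only [Option.map_eq_none_iff] at hnone
                have := ihr.2 hnone
                rw [this]
                have : deltaC (s'.take (s'.length / 2)) + deltaC (s'.drop (s'.length / 2))
                    = deltaC s' := by rw [← deltaC_append, hsplit]
                omega

theorem part2Loop_eq (cs : List Char) : ∀ (pos idx : Int),
    part2Loop cs pos idx
      = match balHit cs pos with
        | some h => idx + h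
        | none => idx + (cs.length : Int) := by
  induction cs with
  | nil => intro pos idx; simp [part2Loop, balHit]
  | cons c cs ih =>
      intro pos idx
      simp only [part2Loop, balHit]
      by_cases h : pos + (if c = '(' then 1 else if c = ')' then -1 else 0) = -1
      · have h' : (if c = '(' then pos + 1 else if c = ')' then pos - 1 else pos) = -1 := by
          split_ifs at h ⊢ <;> omega
        simp [h, h']
      · have h' : ¬ (if c = '(' then pos + 1 else if c = ')' then pos - 1 else pos) = -1 := by
          split_ifs at h ⊢ <;> omega
        have hpos : (if c = '(' then pos + 1 else if c = ')' then pos - 1 else pos)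
            = pos + (if c = '(' then 1 else if c = ')' then -1 else 0) := by
          split_ifs <;> ring
        simp only [if_neg h, hpos, ih]
        cases balHit cs (pos + (if c = '(' then 1 else if c = ')' then -1 else 0)) with
        | some h => simp; ring
        | none => simp [List.length_cons]; ring

-- ===== VERDICT (by name: the statement is the Claim_ definition above) =====
theorem part2_spec : Claim_equal_part2 := by
  intro data _
  unfold Spec_part2 part2 part2_alt
  rw [part2Loop_eq, (solveB_spec data.toList.length data.toList le_rfl 0).1]
  cases balHit data.toList 0 <;> simp
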